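-- pv_equiv track=rewrite | github.com/Mincheol710313/Algorithm | Python/Programmers/PCCP 기출문제/Puzzle_Game.py | func
-- ===== SOURCE A (Python) =====
-- def func(level, diffs, times):
--     total_time = 0
--     prev_time = 0
--
--     for diff, time in zip(diffs, times):
--         if level < diff:
--             total_time += (diff-level)*(prev_time+time)+time
--         else:
--             total_time += time
--
--         prev_time = time
--
--     return total_time
-- ===== SOURCE B (Python) =====
-- def func(level, diffs, times):
--     # Weight view: each time is counted once, multiplied by 1 plus the excess
--     # difficulty of its own puzzle and of the next one (which reuses it as prev).
--     n = min(len(diffs), len(times))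
--     excess = [d - level if level < d else 0 for d in diffs[:n]]
--     nxt = excess[1:] + [0]
--     return sum(t * (1 + e + e2) for t, e, e2 in zip(times[:n], excess, nxt))
-- ===== Notes on version B (the rewrite author's own statement) =====
-- stated objective: alternative
-- what changed: Replaces A's stateful branch loop with a running prev-time by a weight formulation: precompute each index's excess difficulty, then sum times[j]*(1+excess[j]+excess[j+1]) in one weighted sum with no branch and no carried state.
import Mathlib
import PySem

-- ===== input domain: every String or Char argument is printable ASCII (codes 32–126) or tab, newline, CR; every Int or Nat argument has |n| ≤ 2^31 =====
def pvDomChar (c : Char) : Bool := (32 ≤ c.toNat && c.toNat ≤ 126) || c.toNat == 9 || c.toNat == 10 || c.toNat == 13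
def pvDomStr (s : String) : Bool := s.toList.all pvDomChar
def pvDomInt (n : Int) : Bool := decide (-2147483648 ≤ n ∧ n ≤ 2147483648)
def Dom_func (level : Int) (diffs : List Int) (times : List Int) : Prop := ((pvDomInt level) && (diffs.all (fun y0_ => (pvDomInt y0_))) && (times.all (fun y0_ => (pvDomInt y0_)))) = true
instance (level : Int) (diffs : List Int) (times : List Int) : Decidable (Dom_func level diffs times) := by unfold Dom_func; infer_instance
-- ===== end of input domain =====

-- B replaces the stateful branch loop by a per-element weight sum (alternative decomposition).
-- ===== PORT A =====
-- loop body of A: state is (total_time, prev_time)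
def stepA (level : Int) (st : Int × Int) (dt : Int × Int) : Int × Int :=
  if level < dt.1 then (st.1 + ((dt.1 - level) * (st.2 + dt.2) + dt.2), dt.2)
  else (st.1 + dt.2, dt.2)

def func (level : Int) (diffs : List Int) (times : List Int) : Int :=
  ((diffs.zip times).foldl (stepA level) (0, 0)).1

-- ===== PORT B =====
def func_alt (level : Int) (diffs : List Int) (times : List Int) : Int :=
  let n := min diffs.length times.length
  let excess := (diffs.take n).map (fun d => if level < d then d - level else 0)
  let nxt := excess.drop 1 ++ [0]
  (((times.take n).zip (excess.zip nxt)).map (fun x => x.1 * (1 + x.2.1 + x.2.2))).sum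

-- ===== PRECONDITION & SPEC =====
def Spec_func (level : Int) (diffs : List Int) (times : List Int) (out : Int) : Prop := out = func_alt level diffs times
instance (level : Int) (diffs : List Int) (times : List Int) (out : Int) : Decidable (Spec_func level diffs times out) := by unfold Spec_func; infer_instance

-- ===== CLAIM (what is proved, stated in full; the proofs are below) =====
def Claim_equal_func : Prop := ∀ (level : Int) (diffs : List Int) (times : List Int), Dom_func level diffs times → Spec_func level diffs times (func level diffs times)

-- ===== LEMMAS AND PROOFS =====

-- excess of the first paired element (0 if either list is empty)
def eHead (level : Int) : List Int → List Int → Int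
  | d :: _, _ :: _ => if level < d then d - level else 0
  | _, _ => 0

-- common recursive characterisation: the weighted sum
def W (level : Int) : List Int → List Int → Int
  | d :: ds, t :: ts =>
      t * (1 + (if level < d then d - level else 0) + eHead level ds ts) + W level ds ts
  | _, _ => 0

theorem fold_eq (level : Int) : ∀ (diffs times : List Int) (acc prev : Int),
    ((diffs.zip times).foldl (stepA level) (acc, prev)).1
      = acc + prev * eHead level diffs times + W level diffs times := by
  intro diffs
  induction diffs with
  | nil => intro times acc prev; simp [eHead, W]
  | cons d ds ih =>
    intro times acc prev
    cases times with
    | nil => simp [eHead, W]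
    | cons t ts =>
      simp only [List.zip, List.zipWith, List.foldl]
      rw [show stepA level (acc, prev) (d, t)
            = ((if level < d then acc + ((d - level) * (prev + t) + t) else acc + t), t) by
          simp [stepA]; split <;> simp]
      rw [show ((ds.zipWith Prod.mk ts).foldl (stepA level)
            ((if level < d then acc + ((d - level) * (prev + t) + t) else acc + t), t)).1
          = (if level < d then acc + ((d - level) * (prev + t) + t) else acc + t)
              + t * eHead level ds ts + W level ds ts from ih ts _ t]
      simp only [W, eHead]
      split <;> ring

theorem alt_eq (level : Int) : ∀ (diffs times : List Int),
    func_alt level diffs times = W level diffs times := by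
  intro diffs
  induction diffs with
  | nil => intro times; simp [func_alt, W]
  | cons d ds ih =>
    intro times
    cases times with
    | nil => simp [func_alt, W]
    | cons t ts =>
      have h := ih ts
      simp only [func_alt] at h ⊢
      cases ds with
      | nil => cases ts <;> simp [W, eHead]
      | cons d2 ds2 =>
        cases ts with
        | nil => simp [W, eHead]
        | cons t2 ts2 =>
          simp only [List.length_cons, Nat.succ_min_succ, List.take_succ_cons,
            List.map_cons, List.drop_succ_cons, List.drop_zero] at h ⊢
          simp only [List.cons_append, List.zip_cons_cons, List.map_cons, List.sum_cons] at h ⊢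
          rw [h]
          simp [W, eHead]

-- ===== VERDICT (by name: the statement is the Claim_ definition above) =====
theorem func_spec : Claim_equal_func := by
  intro level diffs times _
  unfold Spec_func
  rw [alt_eq]
  unfold func
  rw [fold_eq]
  ring
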